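-- pv_equiv track=rewrite | github.com/OwenHillary/2025-fall-gvsu-symbiosis-mechanisms | experiments/2025-10-02-diff-tasks/analysis/aggregate.py | extract_summary_data
-- ===== SOURCE A (Python) =====
-- def extract_summary_data(data, target_update, fields, prefix=None):
--         info = {}
--
--         # Grab the data line that matches the target update for this run
--         summary_data = [
--             line
--             for line in data
--             if (target_update is None) or (int(line["update"]) == target_update)
--         ][-1]
--
--         # Add specified fields to run summary data
--         for field in summary_data:
--             if field in fields:
--                 if prefix is None:
--                     info[field] = summary_data[field]
--                 else:
--                     info[f"{prefix}_{field}"] = summary_data[field]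
--
--         return info
-- ===== SOURCE B (Python) =====
-- def extract_summary_data(data, target_update, fields, prefix=None):
--     # Single reverse scan with early exit for the last matching line,
--     # then one dict comprehension over its items filtered by a field set.
--     summary_data = None
--     for line in reversed(data):
--         if target_update is None or int(line["update"]) == target_update:
--             summary_data = line
--             break
--     if summary_data is None:
--         raise IndexError("no data line matches target_update")
--     fieldset = set(fields)
--     if prefix is None:
--         return {f: v for f, v in summary_data.items() if f in fieldset}
--     return {f"{prefix}_{f}": v for f, v in summary_data.items() if f in fieldset}
-- ===== Notes on version B (the rewrite author's own statement) =====
-- stated objective: alternative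
-- what changed: B replaces the full filter-then-[-1] pass and the key-driven copy loop by a reverse scan with early exit for the last matching line and a single dict comprehension over its items filtered by a precomputed field set, with the prefix branch hoisted out of the loop.
import Mathlib
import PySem

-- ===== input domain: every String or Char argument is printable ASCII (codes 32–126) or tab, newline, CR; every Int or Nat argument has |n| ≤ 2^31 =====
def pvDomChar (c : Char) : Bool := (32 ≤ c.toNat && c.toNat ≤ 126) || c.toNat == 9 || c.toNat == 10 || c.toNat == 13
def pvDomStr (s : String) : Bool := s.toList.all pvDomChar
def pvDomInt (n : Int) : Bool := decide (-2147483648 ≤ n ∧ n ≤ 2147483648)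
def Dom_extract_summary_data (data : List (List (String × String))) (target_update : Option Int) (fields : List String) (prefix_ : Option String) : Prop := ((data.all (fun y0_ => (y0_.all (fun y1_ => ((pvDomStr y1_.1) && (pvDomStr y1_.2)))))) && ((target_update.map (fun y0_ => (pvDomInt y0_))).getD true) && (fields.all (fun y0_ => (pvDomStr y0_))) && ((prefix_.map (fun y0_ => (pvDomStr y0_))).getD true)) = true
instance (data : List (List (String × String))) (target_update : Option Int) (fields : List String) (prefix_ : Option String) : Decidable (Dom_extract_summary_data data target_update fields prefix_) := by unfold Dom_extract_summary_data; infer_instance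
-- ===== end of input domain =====

-- B: reverse scan with early exit for the last matching line + a comprehension over its
-- items filtered by a field set, instead of filter-then-[-1] and a key-driven copy loop.


-- shared helper: int(line["update"]) (none = KeyError / ValueError)
def pvLineUpdate? (line : List (String × String)) : Option Int :=
  ((PySem.Dict.ofList line).get? "update").bind PySem.Int.ofStr?

-- the comprehension's / loop's condition: (target_update is None) or (int(line["update"]) == target_update)
def pvMatches (target_update : Option Int) (line : List (String × String)) : Bool :=
  match target_update with
  | none => true
  | some t => pvLineUpdate? line == some t

-- ===== PORT A =====
def extract_summary_data (data : List (List (String × String))) (target_update : Option Int) (fields : List String) (prefix_ : Option String) : List (String × String) :=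
  -- summary_data = [line for line in data if …][-1]  ([-1] = pyGet? (-1); none = IndexError, excluded by Pre_)
  let summary_data : PySem.Dict String String :=
    PySem.Dict.ofList ((PySem.List.pyGet? (data.filter (pvMatches target_update)) (-1)).getD [])
  -- for field in summary_data: if field in fields: info[…] = summary_data[field]
  let info : PySem.Dict String String :=
    summary_data.keys.foldl
      (fun info field =>
        if fields.contains field then
          match prefix_ with
          | none => info.insert field (summary_data.getD field "")
          | some p => info.insert (p ++ "_" ++ field) (summary_data.getD field "")
        else info)
      PySem.Dict.empty
  info.items

-- ===== PORT B =====
-- the 'for line in reversed(data): … break' scan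
def pvScanRev (target_update : Option Int) : List (List (String × String)) → Option (List (String × String))
  | [] => none
  | line :: rest => if pvMatches target_update line then some line else pvScanRev target_update rest

def extract_summary_data_alt (data : List (List (String × String))) (target_update : Option Int) (fields : List String) (prefix_ : Option String) : List (String × String) :=
  match pvScanRev target_update data.reverse with
  | none => []  -- Source B raises IndexError here (excluded by Pre_)
  | some line =>
    let d : PySem.Dict String String := PySem.Dict.ofList line
    let fieldset : PySem.Set String := PySem.Set.ofList fields
    match prefix_ with
    | none =>
      ((d.items.filter (fun fv => fieldset.contains fv.1)).foldl
        (fun info fv => info.insert fv.1 fv.2) (PySem.Dict.empty : PySem.Dict String String)).items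
    | some p =>
      ((d.items.filter (fun fv => fieldset.contains fv.1)).foldl
        (fun info fv => info.insert (p ++ "_" ++ fv.1) fv.2) (PySem.Dict.empty : PySem.Dict String String)).items

-- ===== PRECONDITION & SPEC =====
-- Pre_ excludes exactly the inputs where A raises: no line matches ([-1] on an empty list,
-- IndexError), or target_update is an int and some line's "update" is missing or not int-parsable
-- (KeyError / ValueError raised while building the comprehension).
def Pre_extract_summary_data (data : List (List (String × String))) (target_update : Option Int) (fields : List String) (prefix_ : Option String) : Prop :=
  if target_update.isNone then data ≠ []
  else (data.all fun line => (pvLineUpdate? line).isSome) = true ∧ data.any (pvMatches target_update) = true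
instance (data : List (List (String × String))) (target_update : Option Int) (fields : List String) (prefix_ : Option String) : Decidable (Pre_extract_summary_data data target_update fields prefix_) := by unfold Pre_extract_summary_data; infer_instance

def pvWitness_extract_summary_data : (List (List (String × String))) × Option Int × List String × Option String :=
  ([[("update", "1"), ("score", "7")]], some 1, ["score"], none)

def Spec_extract_summary_data (data : List (List (String × String))) (target_update : Option Int) (fields : List String) (prefix_ : Option String) (out : List (String × String)) : Prop := out = extract_summary_data_alt data target_update fields prefix_
instance (data : List (List (String × String))) (target_update : Option Int) (fields : List String) (prefix_ : Option String) (out : List (String × String)) : Decidable (Spec_extract_summary_data data target_update fields prefix_ out) := by unfold Spec_extract_summary_data; infer_instance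

-- ===== CLAIM (what is proved, stated in full; the proofs are below) =====
def Claim_equal_extract_summary_data : Prop := ∀ (data : List (List (String × String))) (target_update : Option Int) (fields : List String) (prefix_ : Option String), Dom_extract_summary_data data target_update fields prefix_ → Pre_extract_summary_data data target_update fields prefix_ → Spec_extract_summary_data data target_update fields prefix_ (extract_summary_data data target_update fields prefix_)

-- ===== LEMMAS AND PROOFS =====

-- B's reverse scan finds the head of the filtered reversed list …
theorem pvScanRev_eq_head? (tu : Option Int) (l : List (List (String × String))) :
    pvScanRev tu l = (l.filter (pvMatches tu)).head? := by
  induction l with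
  | nil => rfl
  | cons x xs ih =>
    by_cases h : pvMatches tu x
    · simp [pvScanRev, h]
    · simp [pvScanRev, h, ih]

-- … i.e. exactly A's [filtered][-1]
theorem pvScanRev_reverse_eq (tu : Option Int) (data : List (List (String × String))) :
    pvScanRev tu data.reverse = PySem.List.pyGet? (data.filter (pvMatches tu)) (-1) := by
  rw [pvScanRev_eq_head?, PySem.List.pyGet?_neg_one, List.filter_reverse, List.head?_reverse]

-- Set membership test equals the plain list membership test A uses
theorem pvContains_ofList (fields : List String) (f : String) :
    (PySem.Set.ofList fields).contains f = fields.contains f := by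
  by_cases h : f ∈ fields <;>
    simp [PySem.Set.contains_eq_listContains, PySem.Set.mem_ofList, h]

-- A's copy loop over the keys of d equals B's fold over d's filtered items
theorem pvCopy_gen (d : PySem.Dict String String) (hnd : d.keys.Nodup)
    (fields : List String) (key : String → String) :
    ∀ (items : List (String × String)), (∀ fv ∈ items, fv ∈ d.items) →
    ∀ acc : PySem.Dict String String,
      (items.map Prod.fst).foldl
        (fun info field =>
          if fields.contains field then info.insert (key field) (d.getD field "") else info) acc =
      (items.filter (fun fv => (PySem.Set.ofList fields).contains fv.1)).foldl
        (fun info fv => info.insert (key fv.1) fv.2) acc := by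
  intro items
  induction items with
  | nil => intro _ _; rfl
  | cons fv rest ih =>
    intro hsub acc
    obtain ⟨k, v⟩ := fv
    have hmem : (k, v) ∈ d.items := hsub _ (List.mem_cons_self)
    have hrest : ∀ fv ∈ rest, fv ∈ d.items := fun fv h => hsub fv (List.mem_cons_of_mem _ h)
    simp only [List.map_cons, List.foldl_cons, List.filter_cons]
    rw [PySem.Dict.getD_of_mem_items d hmem hnd "",
      show ((PySem.Set.ofList fields).contains (k, v).1) = fields.contains k from
        pvContains_ofList fields k]
    by_cases hc : fields.contains k
    · simp only [hc, if_true, List.foldl_cons]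
      exact ih hrest _
    · simp only [Bool.not_eq_true] at hc
      simp only [hc, Bool.false_eq_true, if_false]
      exact ih hrest acc

-- A's copy loop over the keys of d equals B's fold over d's filtered items
theorem pvCopy_eq (d : PySem.Dict String String) (hnd : d.keys.Nodup) (fields : List String)
    (key : String → String) :
    (d.keys.foldl
      (fun info field =>
        if fields.contains field then info.insert (key field) (d.getD field "") else info)
      (PySem.Dict.empty : PySem.Dict String String)) =
    ((d.items.filter (fun fv => (PySem.Set.ofList fields).contains fv.1)).foldl
      (fun info fv => info.insert (key fv.1) fv.2)
      (PySem.Dict.empty : PySem.Dict String String)) := by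
  have hkeys : d.keys = d.items.map Prod.fst := by simp [PySem.Dict.keys]
  rw [hkeys]
  exact pvCopy_gen d hnd fields key d.items (fun _ h => h) _

-- the two ports agree on every input (Pre_ is needed only for Python-side faithfulness)
theorem pv_ports_eq (data : List (List (String × String))) (target_update : Option Int)
    (fields : List String) (prefix_ : Option String) :
    extract_summary_data data target_update fields prefix_ =
    extract_summary_data_alt data target_update fields prefix_ := by
  unfold extract_summary_data extract_summary_data_alt
  rw [pvScanRev_reverse_eq]
  cases hline : PySem.List.pyGet? (data.filter (pvMatches target_update)) (-1) with
  | none => cases prefix_ <;> rfl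
  | some line =>
    simp only [Option.getD_some]
    have hnd : (PySem.Dict.ofList line).keys.Nodup := PySem.Dict.nodup_keys_ofList line
    cases prefix_ with
    | none =>
      simp only []
      rw [pvCopy_eq (PySem.Dict.ofList line) hnd fields (fun f => f)]
    | some p =>
      simp only []
      rw [pvCopy_eq (PySem.Dict.ofList line) hnd fields (fun f => p ++ "_" ++ f)]

-- ===== VERDICT (by name: the statement is the Claim_ definition above) =====
theorem extract_summary_data_spec : Claim_equal_extract_summary_data := by
  intro data target_update fields prefix_ _ _
  unfold Spec_extract_summary_data
  exact pv_ports_eq data target_update fields prefix_
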